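-- pv_equiv track=rewrite | github.com/swayz032/aspire-backend | orchestrator/src/aspire_orchestrator/services/skill_router.py | _detect_dependencies
-- ===== SOURCE A (Python) =====
-- _OUTPUT_DEPENDENCIES: dict[str, set[str]] = {
--     "invoice.create": {"invoice.send", "invoice.void"},
--     "quote.create": {"quote.send"},
--     "contract.generate": {"contract.sign", "contract.send"},
--     "email.draft": {"email.send"},
--     "finance.snapshot.read": {"finance.proposal.create", "finance.packet.draft"},
--     "finance.exceptions.read": {"finance.proposal.create"},
--     "research.search": {"email.draft", "email.send", "contacts.create"},
--     "research.places": {"contacts.create"},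
--     "contacts.search": {"email.send", "email.draft", "invoice.create"},
--     "calendar.read": {"calendar.create", "meeting.schedule"},
--     "calendar.list": {"calendar.create", "meeting.schedule"},
-- }
--
-- def _detect_dependencies(action_types: list[str]) -> dict[str, list[str]]:
--     """Detect data-flow dependencies between actions.
--
--     Returns a mapping of action_type → list of action_types it depends on.
--     For example, if action_types = ["invoice.create", "invoice.send"],
--     then invoice.send depends on invoice.create (needs the invoice_id output).
--     """
--     # Build index: action_type → position
--     positions: dict[str, int] = {}
--     for i, action in enumerate(action_types):
--         if action not in positions:
--             positions[action] = i
--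
--     deps: dict[str, list[str]] = {action: [] for action in action_types}
--
--     for producer, consumers in _OUTPUT_DEPENDENCIES.items():
--         if producer not in positions:
--             continue
--         for consumer in consumers:
--             if consumer in positions and positions[consumer] > positions[producer]:
--                 deps[consumer].append(producer)
--
--     return deps
-- ===== SOURCE B (Python) =====
-- _OUTPUT_DEPENDENCIES: dict[str, set[str]] = {
--     "invoice.create": {"invoice.send", "invoice.void"},
--     "quote.create": {"quote.send"},
--     "contract.generate": {"contract.sign", "contract.send"},
--     "email.draft": {"email.send"},
--     "finance.snapshot.read": {"finance.proposal.create", "finance.packet.draft"},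
--     "finance.exceptions.read": {"finance.proposal.create"},
--     "research.search": {"email.draft", "email.send", "contacts.create"},
--     "research.places": {"contacts.create"},
--     "contacts.search": {"email.send", "email.draft", "invoice.create"},
--     "calendar.read": {"calendar.create", "meeting.schedule"},
--     "calendar.list": {"calendar.create", "meeting.schedule"},
-- }
--
--
-- def _detect_dependencies(action_types: list[str]) -> dict[str, list[str]]:
--     """Consumer-driven variant: look each action up in an inverted
--     producer index instead of scanning every producer's consumer set."""
--     positions: dict[str, int] = {}
--     for i, action in enumerate(action_types):
--         if action not in positions:
--             positions[action] = i
--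
--     inverted: dict[str, list[str]] = {}
--     for producer, consumers in _OUTPUT_DEPENDENCIES.items():
--         for consumer in consumers:
--             inverted.setdefault(consumer, []).append(producer)
--
--     return {
--         consumer: [p for p in inverted.get(consumer, ())
--                    if p in positions and positions[p] < pos]
--         for consumer, pos in positions.items()
--     }
-- ===== Notes on version B (the rewrite author's own statement) =====
-- stated objective: alternative
-- what changed: B inverts the fixed producer table into a consumer->producers index and builds the result by iterating the distinct actions as consumers, instead of A's producer-driven loop that appends into a pre-initialized deps dict.
import Mathlib
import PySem

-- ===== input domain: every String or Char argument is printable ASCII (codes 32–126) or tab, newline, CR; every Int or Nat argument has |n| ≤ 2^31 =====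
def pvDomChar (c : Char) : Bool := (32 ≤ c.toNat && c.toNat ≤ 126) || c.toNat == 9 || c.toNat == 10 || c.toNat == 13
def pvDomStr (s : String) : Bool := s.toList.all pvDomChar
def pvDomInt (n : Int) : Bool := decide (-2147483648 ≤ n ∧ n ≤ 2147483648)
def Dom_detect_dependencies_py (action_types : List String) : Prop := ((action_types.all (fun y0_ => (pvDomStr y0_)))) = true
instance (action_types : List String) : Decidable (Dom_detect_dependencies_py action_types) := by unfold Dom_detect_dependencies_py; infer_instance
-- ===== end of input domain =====

-- B replaces A's producer-driven table scan by an inverted consumer->producers index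
-- looked up per distinct action (consumer-driven): an alternative data structure of the same cost.


-- ===== PORT A =====
-- the module constant _OUTPUT_DEPENDENCIES (set values written as distinct-element lists;
-- the result provably does not depend on the iteration order of each consumer set)
def pvTable : List (String × List String) :=
  [("invoice.create", ["invoice.send", "invoice.void"]),
   ("quote.create", ["quote.send"]),
   ("contract.generate", ["contract.sign", "contract.send"]),
   ("email.draft", ["email.send"]),
   ("finance.snapshot.read", ["finance.proposal.create", "finance.packet.draft"]),
   ("finance.exceptions.read", ["finance.proposal.create"]),
   ("research.search", ["email.draft", "email.send", "contacts.create"]),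
   ("research.places", ["contacts.create"]),
   ("contacts.search", ["email.send", "email.draft", "invoice.create"]),
   ("calendar.read", ["calendar.create", "meeting.schedule"]),
   ("calendar.list", ["calendar.create", "meeting.schedule"])]

-- the 'positions' first-occurrence loop, textually identical in A and B
def pvPositions (action_types : List String) : PySem.Dict String Int :=
  (PySem.List.enumerate action_types 0).foldl
    (fun d p => if d.contains p.2 then d else d.insert p.2 p.1) PySem.Dict.empty

def detect_dependencies_py (action_types : List String) : List (String × List String) :=
  let positions := pvPositions action_types
  let deps0 := action_types.foldl (fun d a => d.insert a ([] : List String)) PySem.Dict.empty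
  let deps := pvTable.foldl (fun d pe =>
      if positions.contains pe.1 then
        pe.2.foldl (fun d c =>
          if positions.contains c && decide (positions.getD c 0 > positions.getD pe.1 0) then
            d.modify c [] (fun v => v ++ [pe.1])
          else d) d
      else d) deps0
  deps.items

-- ===== PORT B =====
def detect_dependencies_py_alt (action_types : List String) : List (String × List String) :=
  let positions := pvPositions action_types
  let inverted := pvTable.foldl (fun d pe =>
      pe.2.foldl (fun d c => d.modify c [] (fun v => v ++ [pe.1])) d) PySem.Dict.empty
  let res := positions.items.foldl (fun d p =>
      d.insert p.1 ((inverted.getD p.1 []).filter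
        (fun q => positions.contains q && decide (positions.getD q 0 < p.2)))) PySem.Dict.empty
  res.items

-- ===== PRECONDITION & SPEC =====
def Spec_detect_dependencies_py (action_types : List String) (out : List (String × List String)) : Prop := out = detect_dependencies_py_alt action_types
instance (action_types : List String) (out : List (String × List String)) : Decidable (Spec_detect_dependencies_py action_types out) := by unfold Spec_detect_dependencies_py; infer_instance

-- ===== CLAIM (what is proved, stated in full; the proofs are below) =====
def Claim_equal_detect_dependencies_py : Prop := ∀ (action_types : List String), Dom_detect_dependencies_py action_types → Spec_detect_dependencies_py action_types (detect_dependencies_py action_types)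

-- ===== LEMMAS AND PROOFS =====

theorem gen_keys (l : List (Int × String)) : ∀ (d : PySem.Dict String Int),
    (l.foldl (fun d p => if d.contains p.2 then d else d.insert p.2 p.1) d).keys
      = PySem.Set.update d.keys (l.map (·.2)) := by
  induction l with
  | nil => intro d; simp [PySem.Set.update_nil]
  | cons p l ih =>
    intro d
    simp only [List.foldl_cons, List.map_cons, PySem.Set.update_cons]
    by_cases h : d.contains p.2 = true
    · rw [if_pos h, ih]
      have : PySem.Set.add d.keys p.2 = d.keys := by
        simp [PySem.Set.add, (PySem.Dict.contains_iff_mem_keys d p.2).mp h]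
      rw [this]
    · rw [if_neg h, ih]
      have hm : p.2 ∉ d.keys := fun hx => h ((PySem.Dict.contains_iff_mem_keys d p.2).mpr hx)
      rw [PySem.Dict.keys_insert_of_not_contains (h := by simpa using h)]
      simp [PySem.Set.add, hm]

theorem pvPositions_keys (ats : List String) :
    (pvPositions ats).keys
      = PySem.Set.ofList ats := by
  unfold pvPositions
  rw [gen_keys]
  simp [PySem.List.map_snd_enumerate, PySem.Set.update_nil_left]

theorem pvPositions_keys_nodup (ats : List String) :
    (pvPositions ats).keys.Nodup := by
  rw [pvPositions_keys]; exact PySem.Set.nodup_ofList _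

theorem deps0_keys (ats : List String) :
    (ats.foldl (fun d a => d.insert a ([] : List String)) PySem.Dict.empty).keys
      = PySem.Set.ofList ats := by
  rw [PySem.Dict.keys_foldl_insert]
  simp [PySem.Set.update_nil_left]

theorem deps0_getD_gen (ats : List String) : ∀ (d : PySem.Dict String (List String)) (k : String),
    d.getD k [] = [] →
    (ats.foldl (fun d a => d.insert a ([] : List String)) d).getD k [] = [] := by
  induction ats with
  | nil => intro d k h; simpa using h
  | cons a l ih =>
    intro d k h
    simp only [List.foldl_cons]
    exact ih _ _ (by rw [PySem.Dict.getD_insert]; split <;> simp [h])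

theorem deps0_getD (ats : List String) (k : String) :
    (ats.foldl (fun d a => d.insert a ([] : List String)) PySem.Dict.empty).getD k [] = [] := by
  exact deps0_getD_gen ats PySem.Dict.empty k (by simp [PySem.Dict.getD_empty])

theorem a_fold_eq (pos : PySem.Dict String Int) (t : List (String × List String)) :
    ∀ (d : PySem.Dict String (List String)),
    t.foldl (fun d pe =>
      if pos.contains pe.1 then
        pe.2.foldl (fun d c =>
          if pos.contains c && decide (pos.getD c 0 > pos.getD pe.1 0) then
            d.modify c [] (fun v => v ++ [pe.1])
          else d) d
      else d) d
    = (t.flatMap (fun pe =>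
        (pe.2.filter (fun c => pos.contains pe.1 && (pos.contains c && decide (pos.getD c 0 > pos.getD pe.1 0)))).map
          (fun c => (c, pe.1)))).foldl
        (fun d q => d.modify q.1 [] (fun v => v ++ [q.2])) d := by
  induction t with
  | nil => intro d; rfl
  | cons pe t ih =>
    intro d
    rw [List.flatMap_cons, List.foldl_append, List.foldl_cons, ih]
    congr 1
    rw [List.foldl_map]
    by_cases h : pos.contains pe.1 = true
    · rw [if_pos h]
      simp only [h, Bool.true_and]
      rw [List.foldl_filter]
    · rw [if_neg h]
      simp only [Bool.not_eq_true] at h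
      simp [h]

theorem b_fold_eq (t : List (String × List String)) :
    ∀ (d : PySem.Dict String (List String)),
    t.foldl (fun d pe =>
      pe.2.foldl (fun d c => d.modify c [] (fun v => v ++ [pe.1])) d) d
    = (t.flatMap (fun pe => pe.2.map (fun c => (c, pe.1)))).foldl
        (fun d q => d.modify q.1 [] (fun v => v ++ [q.2])) d := by
  induction t with
  | nil => intro d; rfl
  | cons pe t ih =>
    intro d
    rw [List.flatMap_cons, List.foldl_append, List.foldl_cons, ih, List.foldl_map]

theorem per_key_entry (pos : PySem.Dict String Int) (k p : String) (hk : pos.contains k = true)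
    (cs : List String) :
    (((cs.filter (fun c => pos.contains p && (pos.contains c && decide (pos.getD c 0 > pos.getD p 0)))).map
        (fun c => (c, p))).filter (fun q => q.1 == k)).map (·.2)
    = (((cs.map (fun c => (c, p))).filter (fun q => q.1 == k)).map (·.2)).filter
        (fun q => pos.contains q && decide (pos.getD q 0 < pos.getD k 0)) := by
  induction cs with
  | nil => rfl
  | cons c cs ih =>
    by_cases hc : c = k
    · subst hc
      by_cases hp : (pos.contains p && decide (pos.getD p 0 < pos.getD c 0)) = true
      · have hg : (pos.contains p && (pos.contains c && decide (pos.getD c 0 > pos.getD p 0))) = true := by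
          simp only [Bool.and_eq_true, decide_eq_true_eq] at hp ⊢
          exact ⟨hp.1, hk, hp.2⟩
        simp only [List.filter_cons, List.map_cons, hg, if_true]
        simp only [List.filter_cons, List.map_cons, beq_self_eq_true, if_true]
        rw [if_pos hp]
        exact congrArg _ ih
      · have hpb : (pos.contains p && decide (pos.getD p 0 < pos.getD c 0)) = false :=
          Bool.eq_false_iff.mpr hp
        have hg : (pos.contains p && (pos.contains c && decide (pos.getD c 0 > pos.getD p 0))) = false := by
          apply Bool.eq_false_iff.mpr
          intro hcon
          simp only [Bool.and_eq_true, decide_eq_true_eq, gt_iff_lt] at hcon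
          simp only [Bool.and_eq_true, decide_eq_true_eq, not_and] at hp
          exact hp hcon.1 hcon.2.2
        simp only [List.filter_cons, List.map_cons, hg, Bool.false_eq_true, if_false]
        simp only [List.filter_cons, List.map_cons, beq_self_eq_true, if_true]
        rw [if_neg (by simp [hpb])]
        exact ih
    · have hbc : ((c, p).1 == k) = false := by simpa using hc
      by_cases hg : (pos.contains p && (pos.contains c && decide (pos.getD c 0 > pos.getD p 0))) = true
      · simp only [List.filter_cons, List.map_cons, hg, if_true, hbc, Bool.false_eq_true, if_false]
        exact ih
      · simp only [List.filter_cons, List.map_cons, Bool.not_eq_true] at hg ⊢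
        simp only [hg, Bool.false_eq_true, if_false, hbc]
        exact ih

theorem per_key_eq (pos : PySem.Dict String Int) (k : String) (hk : pos.contains k = true)
    (t : List (String × List String)) :
    ((t.flatMap (fun pe =>
        (pe.2.filter (fun c => pos.contains pe.1 && (pos.contains c && decide (pos.getD c 0 > pos.getD pe.1 0)))).map
          (fun c => (c, pe.1)))).filter (fun q => q.1 == k)).map (·.2)
    = (((t.flatMap (fun pe => pe.2.map (fun c => (c, pe.1)))).filter (fun q => q.1 == k)).map (·.2)).filter
        (fun q => pos.contains q && decide (pos.getD q 0 < pos.getD k 0)) := by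
  induction t with
  | nil => rfl
  | cons pe t ih =>
    simp only [List.flatMap_cons, List.filter_append, List.map_append]
    rw [per_key_entry pos k pe.1 hk pe.2, ih]

theorem detect_eq (ats : List String) :
    detect_dependencies_py ats = detect_dependencies_py_alt ats := by
  unfold detect_dependencies_py detect_dependencies_py_alt
  simp only []
  set pos := pvPositions ats with hpos
  set deps0 := ats.foldl (fun d a => d.insert a ([] : List String)) PySem.Dict.empty with hdeps0
  rw [a_fold_eq, b_fold_eq]
  set LA := pvTable.flatMap (fun pe =>
        (pe.2.filter (fun c => pos.contains pe.1 && (pos.contains c && decide (pos.getD c 0 > pos.getD pe.1 0)))).map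
          (fun c => (c, pe.1))) with hLA
  set LB := pvTable.flatMap (fun pe => pe.2.map (fun c => (c, pe.1))) with hLB
  -- facts
  have hkeys0 : deps0.keys = PySem.Set.ofList ats := deps0_keys ats
  have hposk : pos.keys = PySem.Set.ofList ats := pvPositions_keys ats
  have hnodpos : pos.keys.Nodup := pvPositions_keys_nodup ats
  have hnod0 : deps0.keys.Nodup := by rw [hkeys0]; exact PySem.Set.nodup_ofList _
  -- keys of A's deps
  have hLAmem : ∀ x ∈ LA.map (·.1), x ∈ deps0.keys := by
    intro x hx
    rw [hkeys0, ← hposk]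
    simp only [hLA, List.mem_map, List.mem_flatMap] at hx
    obtain ⟨q, ⟨pe, hpe, hq⟩, rfl⟩ := hx
    simp only [List.mem_filter, Bool.and_eq_true] at hq
    obtain ⟨c, ⟨hcmem, hcond⟩, rfl⟩ := hq
    exact (PySem.Dict.contains_iff_mem_keys pos c).mp hcond.2.1
  have hdepsA_keys : (LA.foldl (fun d q => d.modify q.1 [] (fun v => v ++ [q.2])) deps0).keys = deps0.keys := by
    rw [PySem.Dict.keys_foldl_modify_key]
    rw [PySem.Set.update_eq_append_filter]
    have : (PySem.Set.ofList (LA.map (·.1))).filter (fun y => !(PySem.Set.contains deps0.keys y)) = [] := by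
      apply List.filter_eq_nil_iff.mpr
      intro x hx
      have hxm := hLAmem x (by simpa [PySem.Set.mem_ofList] using hx)
      simp [PySem.Set.contains, hxm]
    rw [this, List.append_nil]
  -- A's items
  have hAitems : (LA.foldl (fun d q => d.modify q.1 [] (fun v => v ++ [q.2])) deps0).items
      = (PySem.Set.ofList ats).map (fun k => (k, (LA.filter (fun q => q.1 == k)).map (·.2))) := by
    rw [PySem.Dict.items_eq_map_keys _ (by rw [hdepsA_keys]; exact hnod0) []]
    rw [hdepsA_keys, hkeys0]
    apply List.map_congr_left
    intro k hkmem
    rw [PySem.Dict.getD_foldl_modify_append, deps0_getD]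
    simp
  -- B's items
  have hinv : ∀ k : String,
      (LB.foldl (fun d q => d.modify q.1 [] (fun v => v ++ [q.2])) PySem.Dict.empty).getD k []
        = (LB.filter (fun q => q.1 == k)).map (·.2) := by
    intro k
    rw [PySem.Dict.getD_foldl_modify_append]
    simp
  have hBitems : (pos.items.foldl (fun d p =>
      d.insert p.1 (((LB.foldl (fun d q => d.modify q.1 [] (fun v => v ++ [q.2])) PySem.Dict.empty).getD p.1 []).filter
        (fun q => pos.contains q && decide (pos.getD q 0 < p.2)))) PySem.Dict.empty).items
      = (PySem.Set.ofList ats).map (fun k => (k,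
          ((LB.filter (fun q => q.1 == k)).map (·.2)).filter
            (fun q => pos.contains q && decide (pos.getD q 0 < pos.getD k 0)))) := by
    rw [PySem.Dict.items_foldl_insert_fresh pos.items (fun p => p.1)
      (fun p => (((LB.foldl (fun d q => d.modify q.1 [] (fun v => v ++ [q.2])) PySem.Dict.empty).getD p.1 []).filter
        (fun q => pos.contains q && decide (pos.getD q 0 < p.2)))) PySem.Dict.empty
      (by intro a _; exact PySem.Dict.contains_empty _)
      (by simpa [PySem.Dict.keys] using hnodpos)]
    rw [PySem.Dict.items_eq_map_keys pos hnodpos 0]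
    simp only [List.map_map]
    rw [hposk]
    apply List.map_congr_left
    intro k hkmem
    simp only [Function.comp]
    rw [hinv k]
  rw [hAitems, hBitems]
  apply List.map_congr_left
  intro k hkmem
  have hk : pos.contains k = true :=
    (PySem.Dict.contains_iff_mem_keys pos k).mpr (by rw [hposk]; exact hkmem)
  exact congrArg (fun l => (k, l)) (per_key_eq pos k hk pvTable)

-- ===== VERDICT (by name: the statement is the Claim_ definition above) =====
theorem detect_dependencies_py_spec : Claim_equal_detect_dependencies_py := by
  intro ats _
  unfold Spec_detect_dependencies_py
  exact detect_eq ats
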